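-- pv_equiv track=rewrite | github.com/janbolt/SciCompiler-AI-Scientist | backend/app/orchestrator.py | get_rerun_set
-- ===== SOURCE A (Python) =====
-- AGENT_ORDER = [
--     "hypothesis",
--     "literature_qc",
--     "protocol_candidates",
--     "evidence_claims",
--     "risks",
--     "plan",
--     "budget",
--     "timeline",
--     "validation",
--     "cro_ready_brief",
-- ]
--
-- def get_rerun_set(annotated_sections: list[str]) -> list[str]:
--     if not annotated_sections:
--         return []
--     valid = [s for s in annotated_sections if s in AGENT_ORDER]
--     if not valid:
--         return []
--     earliest_index = min(AGENT_ORDER.index(s) for s in valid)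
--     return AGENT_ORDER[earliest_index:]
-- ===== SOURCE B (Python) =====
-- AGENT_ORDER = [
--     "hypothesis",
--     "literature_qc",
--     "protocol_candidates",
--     "evidence_claims",
--     "risks",
--     "plan",
--     "budget",
--     "timeline",
--     "validation",
--     "cro_ready_brief",
-- ]
--
-- def get_rerun_set(annotated_sections: list[str]) -> list[str]:
--     present = set(annotated_sections)
--     for i, name in enumerate(AGENT_ORDER):
--         if name in present:
--             return AGENT_ORDER[i:]
--     return []
-- ===== Notes on version B (the rewrite author's own statement) =====
-- stated objective: idiomatic
-- what changed: B builds a set of the input once and scans AGENT_ORDER in order with early exit at the first present name, instead of filtering the input, mapping each valid element through AGENT_ORDER.index and taking the min of those indices.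
import Mathlib
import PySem

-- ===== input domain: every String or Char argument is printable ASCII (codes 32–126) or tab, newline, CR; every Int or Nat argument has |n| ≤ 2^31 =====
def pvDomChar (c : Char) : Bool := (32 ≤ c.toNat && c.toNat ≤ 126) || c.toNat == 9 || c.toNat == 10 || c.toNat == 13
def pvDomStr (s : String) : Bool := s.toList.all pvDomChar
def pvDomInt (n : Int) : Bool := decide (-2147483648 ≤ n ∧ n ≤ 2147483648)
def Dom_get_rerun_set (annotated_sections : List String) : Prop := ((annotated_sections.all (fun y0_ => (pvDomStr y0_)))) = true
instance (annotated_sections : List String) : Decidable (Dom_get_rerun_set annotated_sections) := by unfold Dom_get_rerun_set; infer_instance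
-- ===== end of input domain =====

-- B replaces A's filter / index-map / min pipeline by a single early-exit scan of AGENT_ORDER against a set of the input (idiomatic; same return value).

def pvAGENT_ORDER : List String :=
  ["hypothesis", "literature_qc", "protocol_candidates", "evidence_claims", "risks",
   "plan", "budget", "timeline", "validation", "cro_ready_brief"]

-- ===== PORT A =====
def get_rerun_set (annotated_sections : List String) : List String :=
  if annotated_sections = [] then []
  else
    let valid := annotated_sections.filter (fun s => pvAGENT_ORDER.contains s)
    if valid = [] then []
    else
      -- exact: every s ∈ valid is in AGENT_ORDER so index? is some, and valid ≠ [] so min? is some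
      let earliest_index : Int :=
        (PySem.List.min? (valid.map (fun s => (((PySem.List.index? pvAGENT_ORDER s).getD 0 : Nat) : Int))) (fun y => y)).getD 0
      PySem.List.slice pvAGENT_ORDER (some earliest_index) none

-- ===== PORT B =====
def pvScanOrder (present : PySem.Set String) : List (Int × String) → List String
  | [] => []
  | (i, name) :: rest =>
      if present.contains name then PySem.List.slice pvAGENT_ORDER (some i) none
      else pvScanOrder present rest

def get_rerun_set_alt (annotated_sections : List String) : List String :=
  pvScanOrder (PySem.Set.ofList annotated_sections) (PySem.List.enumerate pvAGENT_ORDER 0)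

-- ===== PRECONDITION & SPEC =====
def Spec_get_rerun_set (annotated_sections : List String) (out : List String) : Prop := out = get_rerun_set_alt annotated_sections
instance (annotated_sections : List String) (out : List String) : Decidable (Spec_get_rerun_set annotated_sections out) := by unfold Spec_get_rerun_set; infer_instance

-- ===== CLAIM (what is proved, stated in full; the proofs are below) =====
def Claim_equal_get_rerun_set : Prop := ∀ (annotated_sections : List String), Dom_get_rerun_set annotated_sections → Spec_get_rerun_set annotated_sections (get_rerun_set annotated_sections)

-- ===== LEMMAS AND PROOFS =====

-- the Python value AGENT_ORDER.index(s), as computed in port A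
def pvF (s : String) : Int := (((PySem.List.index? pvAGENT_ORDER s).getD 0 : Nat) : Int)

-- the index of the first AGENT_ORDER name present in xs (= length 10 if none)
def pvKidx (xs : List String) : Nat := pvAGENT_ORDER.findIdx (fun s => xs.contains s)

lemma pvF_eq (s : String) (hs : s ∈ pvAGENT_ORDER) : pvF s = (List.idxOf s pvAGENT_ORDER : Int) := by
  rw [pvF, PySem.List.index?_eq_idxOf?, List.idxOf_eq_getD_idxOf?]
  cases h : List.idxOf? s pvAGENT_ORDER with
  | none =>
      exact absurd (List.isSome_idxOf?.mpr hs) (by simp [h])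
  | some i => simp

lemma pvKidx_le (xs : List String) (s : String) (hsx : s ∈ xs) (hsa : s ∈ pvAGENT_ORDER) :
    pvKidx xs ≤ List.idxOf s pvAGENT_ORDER := by
  by_contra hlt0
  have hlt : List.idxOf s pvAGENT_ORDER < pvKidx xs := Nat.not_le.mp hlt0
  have hlen : List.idxOf s pvAGENT_ORDER < pvAGENT_ORDER.length := List.idxOf_lt_length_iff.mpr hsa
  have h := List.not_of_lt_findIdx (p := fun t => xs.contains t) hlt
  simp [List.contains_eq_mem, hsx] at h

lemma pvScan_eq (present : PySem.Set String) (ao : List String) : ∀ (n : Nat),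
    pvScanOrder present (PySem.List.enumerate ao ((n : Nat) : Int)) =
      if ao.findIdx (fun s => PySem.Set.contains present s) < ao.length
      then pvAGENT_ORDER.drop (n + ao.findIdx (fun s => PySem.Set.contains present s))
      else [] := by
  induction ao with
  | nil => intro n; simp only [PySem.List.enumerate_nil, pvScanOrder]; simp
  | cons a ao ih =>
    intro n
    rw [PySem.List.enumerate_cons]
    simp only [pvScanOrder, List.findIdx_cons]
    by_cases h : PySem.Set.contains present a = true
    · rw [if_pos h, h, cond_true, PySem.List.slice_from_natCast,
        if_pos (by simp : 0 < (a :: ao).length), Nat.add_zero]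
    · have h' : PySem.Set.contains present a = false := by simpa using h
      have hcast : ((n : Nat) : Int) + 1 = (((n + 1 : Nat) : Nat) : Int) := by push_cast; ring
      rw [if_neg h, h', cond_false, hcast, ih (n + 1)]
      by_cases hc : ao.findIdx (fun s => PySem.Set.contains present s) < ao.length
      · rw [if_pos hc, if_pos (by simpa [List.length_cons] using Nat.succ_lt_succ hc)]
        congr 1
        omega
      · rw [if_neg hc, if_neg (by simpa [List.length_cons, Nat.succ_lt_succ_iff] using hc)]

lemma pvB_eq (xs : List String) :
    get_rerun_set_alt xs = pvAGENT_ORDER.drop (pvKidx xs) := by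
  have hp : (fun s => PySem.Set.contains (PySem.Set.ofList xs) s) = (fun s => xs.contains s) :=
    funext fun s => by
      simp [PySem.Set.contains, List.contains_eq_mem, PySem.Set.mem_ofList]
  have h := pvScan_eq (PySem.Set.ofList xs) pvAGENT_ORDER 0
  rw [get_rerun_set_alt, show (0 : Int) = ((0 : Nat) : Int) by norm_num, h, hp]
  by_cases hc : pvKidx xs < pvAGENT_ORDER.length
  · rw [if_pos (by exact hc), Nat.zero_add]
    rfl
  · rw [if_neg (by exact hc)]
    have : pvKidx xs = pvAGENT_ORDER.length :=
      Nat.le_antisymm List.findIdx_le_length (Nat.not_lt.mp hc)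
    rw [this, List.drop_length]

lemma pvA_eq (xs : List String) :
    get_rerun_set xs = pvAGENT_ORDER.drop (pvKidx xs) := by
  rw [get_rerun_set]
  by_cases hnil : xs = []
  · subst hnil
    rw [if_pos rfl]
    decide
  · rw [if_neg hnil]
    by_cases hv : xs.filter (fun s => pvAGENT_ORDER.contains s) = []
    · rw [if_pos hv]
      have hall := List.filter_eq_nil_iff.mp hv
      have hK : pvKidx xs = pvAGENT_ORDER.length := by
        refine Nat.le_antisymm List.findIdx_le_length (Nat.not_lt.mp ?_)
        intro hlt
        have hget : (fun s => xs.contains s) (pvAGENT_ORDER[pvKidx xs]'hlt) = true :=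
          List.findIdx_getElem (w := hlt)
        simp only [List.contains_eq_mem, decide_eq_true_eq] at hget
        exact hall _ hget (by simp [List.contains_eq_mem, List.getElem_mem])
      rw [hK, List.drop_length]
    · rw [if_neg hv]
      -- valid is nonempty, so min? is some m; show m = pvKidx xs
      cases hm : PySem.List.min? ((xs.filter (fun s => pvAGENT_ORDER.contains s)).map
          (fun s => (((PySem.List.index? pvAGENT_ORDER s).getD 0 : Nat) : Int))) (fun y => y) with
      | none =>
          rw [PySem.List.min?_eq_none_iff] at hm
          exact absurd (List.map_eq_nil_iff.mp hm) hv
      | some m =>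
        -- the witness w = AGENT_ORDER[pvKidx xs]
        obtain ⟨v1, hv1⟩ := List.exists_mem_of_ne_nil _ hv
        obtain ⟨hv1x, hv1c⟩ := List.mem_filter.mp hv1
        have hv1a : v1 ∈ pvAGENT_ORDER := by simpa [List.contains_eq_mem] using hv1c
        have hKlt : pvKidx xs < pvAGENT_ORDER.length :=
          Nat.lt_of_le_of_lt (pvKidx_le xs v1 hv1x hv1a) (List.idxOf_lt_length_iff.mpr hv1a)
        have hwq : (fun s => xs.contains s) (pvAGENT_ORDER[pvKidx xs]'hKlt) = true :=
          List.findIdx_getElem (w := hKlt)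
        set w := pvAGENT_ORDER[pvKidx xs]'hKlt with hwdef
        have hwx : w ∈ xs := by simpa [List.contains_eq_mem] using hwq
        have hwa : w ∈ pvAGENT_ORDER := List.getElem_mem _
        have hwv : w ∈ xs.filter (fun s => pvAGENT_ORDER.contains s) :=
          List.mem_filter.mpr ⟨hwx, by simp [List.contains_eq_mem, hwa]⟩
        have hwidx : List.idxOf w pvAGENT_ORDER = pvKidx xs := by
          refine Nat.le_antisymm ?_ (pvKidx_le xs w hwx hwa)
          have hnodup : pvAGENT_ORDER.Nodup := by decide
          rw [hwdef, List.Nodup.idxOf_getElem hnodup _ hKlt]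
        -- m is bounded below and above by pvKidx xs
        obtain ⟨v0, hv0mem, hv0eq⟩ := List.mem_map.mp (PySem.List.min?_mem hm)
        obtain ⟨hv0x, hv0c⟩ := List.mem_filter.mp hv0mem
        have hv0a : v0 ∈ pvAGENT_ORDER := by simpa [List.contains_eq_mem] using hv0c
        have hlow : (pvKidx xs : Int) ≤ m := by
          rw [← hv0eq, ← pvF, pvF_eq v0 hv0a]
          exact_mod_cast pvKidx_le xs v0 hv0x hv0a
        have hhigh : m ≤ (pvKidx xs : Int) := by
          have := PySem.List.min?_isMin hm _ (List.mem_map_of_mem hwv)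
          rwa [← pvF, pvF_eq w hwa, hwidx] at this
        have hmK : m = ((pvKidx xs : Nat) : Int) := le_antisymm hhigh hlow
        show PySem.List.slice pvAGENT_ORDER (some ((some m).getD 0)) none =
          List.drop (pvKidx xs) pvAGENT_ORDER
        rw [Option.getD_some, hmK, PySem.List.slice_from_natCast]

-- ===== VERDICT (by name: the statement is the Claim_ definition above) =====
theorem get_rerun_set_spec : Claim_equal_get_rerun_set := by
  intro xs _
  unfold Spec_get_rerun_set
  rw [pvA_eq, pvB_eq]
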